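-- pv_equiv track=rewrite | github.com/thilinahansana/University-Scheduler-Backend-new-release | generator/algorithms/pso/pso_v1.py | find_consecutive_periods
-- ===== SOURCE A (Python) =====
-- def find_consecutive_periods(duration, valid_periods):
--     """
--     Given a duration and a list of valid (non-interval) periods sorted by 'index',
--     return all possible blocks (each block is a list of consecutive period objects)
--     of length 'duration' that do not skip any intermediate period indices.
--
--     Enhanced to prioritize blocks that:
--     1. Have no breaks/gaps
--     2. Are earliest in the day when possible
--     3. Follow natural time blocks (morning/afternoon)
--     """
--     if not valid_periods or len(valid_periods) < duration:
--         return []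
--
--     # First sort by index to ensure chronological order
--     valid_periods_sorted = sorted(valid_periods, key=lambda p: p["index"])
--
--     if len(valid_periods_sorted) < duration:
--         return []
--
--     consecutive_blocks = []
--
--     # Find all possible consecutive blocks
--     for i in range(len(valid_periods_sorted) - duration + 1):
--         block = valid_periods_sorted[i:i+duration]
--         indices = [p["index"] for p in block]
--
--         # Check if block has consecutive indices (no gaps)
--         if all(indices[j+1] == indices[j] + 1 for j in range(len(indices) - 1)):
--             # Calculate a priority score for this block (lower is better)
--             # Prefer earlier blocks and natural time boundaries
--             start_time = indices[0]
--             priority_score = start_time  # Lower start times are preferred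
--
--             # Add the block with its priority score
--             consecutive_blocks.append((block, priority_score))
--
--     # Sort blocks by priority score
--     consecutive_blocks.sort(key=lambda x: x[1])
--
--     # Return just the blocks, not the scores
--     return [block for block, _ in consecutive_blocks]
-- ===== SOURCE B (Python) =====
-- def find_consecutive_periods(duration, valid_periods):
--     if duration <= 0 or len(valid_periods) < duration:
--         return []
--     periods = sorted(valid_periods, key=lambda p: p["index"])
--     blocks = []
--     window = []
--     for p in periods:
--         if window and p["index"] != window[-1]["index"] + 1:
--             window = []
--         window.append(p)
--         if len(window) > duration:
--             window.pop(0)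
--         if len(window) == duration:
--             blocks.append(window.copy())
--     return blocks
-- ===== Notes on version B (the rewrite author's own statement) =====
-- stated objective: alternative
-- what changed: A slices and re-checks every length-duration window (O(duration) work per window) and then re-sorts the blocks by start index; B makes a single pass over the sorted periods maintaining a sliding window of the current consecutive run, emitting a block whenever the window reaches the duration, with no per-window gap re-check and no final sort.
-- crash fix: On a non-empty period list with duration <= 0, A raises (IndexError on indices[0] of an empty block, or KeyError inside sorted if a period lacks 'index'); B returns []. — e.g. on find_consecutive_periods(0, [[("index", 1)]]): A raises IndexError, B returns []
import Mathlib
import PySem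

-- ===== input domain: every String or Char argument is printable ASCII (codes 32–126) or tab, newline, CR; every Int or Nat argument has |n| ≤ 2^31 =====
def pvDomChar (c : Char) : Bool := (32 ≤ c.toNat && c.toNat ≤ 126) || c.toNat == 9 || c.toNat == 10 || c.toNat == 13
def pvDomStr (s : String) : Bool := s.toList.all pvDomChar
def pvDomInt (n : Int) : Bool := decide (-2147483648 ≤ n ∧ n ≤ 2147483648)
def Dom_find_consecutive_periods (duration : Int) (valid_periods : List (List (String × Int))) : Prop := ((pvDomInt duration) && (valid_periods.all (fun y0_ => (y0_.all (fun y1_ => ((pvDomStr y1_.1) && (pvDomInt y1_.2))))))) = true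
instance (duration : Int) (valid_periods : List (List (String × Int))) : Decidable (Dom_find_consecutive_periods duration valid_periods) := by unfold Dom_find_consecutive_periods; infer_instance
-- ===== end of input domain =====

-- B replaces A's slice-every-window-and-re-sort scan by a single pass over the sorted
-- periods that maintains a sliding window of the current consecutive run (no per-window
-- gap re-check, no final sort); objective: alternative (same asymptotic cost).

-- ===== PORT A =====
-- p["index"] (periods are dicts; first-match lookup). Under Pre_ the key is present,
-- so the default 0 is never the value Python would have raised on.
def pvIdx (p : List (String × Int)) : Int := ((PySem.Dict.mk p).get? "index").getD 0

def find_consecutive_periods (duration : Int) (valid_periods : List (List (String × Int))) : List (List (List (String × Int))) :=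
  if valid_periods.isEmpty || decide ((valid_periods.length : Int) < duration) then []
  else
    let vps_sorted := PySem.List.sorted valid_periods (fun p => pvIdx p)
    if decide ((vps_sorted.length : Int) < duration) then []
    else
      let consecutive_blocks :=
        (PySem.List.pyRange 0 ((vps_sorted.length : Int) - duration + 1)).foldl
          (fun acc i =>
            let block := PySem.List.slice vps_sorted (some i) (some (i + duration))
            let indices := block.map (fun p => pvIdx p)
            if (PySem.List.pyRange 0 ((indices.length : Int) - 1)).all
                 (fun j => PySem.List.pyGetD indices (j + 1) 0 == PySem.List.pyGetD indices j 0 + 1)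
            then acc ++ [(block, PySem.List.pyGetD indices 0 0)]
            else acc)
          []
      (PySem.List.sorted consecutive_blocks (fun x => x.2)).map (fun x => x.1)

-- ===== PORT B =====
-- the single pass of Source B: `window` is the sliding window, `blocks` the output accumulator
def pvGo (d : Nat) (window : List (List (String × Int))) (blocks : List (List (List (String × Int)))) (xs : List (List (String × Int))) : List (List (List (String × Int))) :=
  match xs with
  | [] => blocks
  | p :: rest =>
    let w1 := if window ≠ [] ∧ pvIdx p ≠ pvIdx (window.getLastD []) + 1 then [] else window
    let w2 := w1 ++ [p]
    let w3 := if d < w2.length then w2.tail else w2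
    let blocks' := if w3.length = d then blocks ++ [w3] else blocks
    pvGo d w3 blocks' rest

def find_consecutive_periods_alt (duration : Int) (valid_periods : List (List (String × Int))) : List (List (List (String × Int))) :=
  if duration ≤ 0 ∨ (valid_periods.length : Int) < duration then []
  else
    let periods := PySem.List.sorted valid_periods (fun p => pvIdx p)
    pvGo duration.toNat [] [] periods

-- ===== PRECONDITION & SPEC =====
-- Pre_ excludes exactly the inputs on which Python A raises: a non-empty list of length ≥ duration
-- with duration ≤ 0 (IndexError on indices[0]) or with a period lacking the "index" key (KeyError in sorted).
def Pre_find_consecutive_periods (duration : Int) (valid_periods : List (List (String × Int))) : Prop :=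
  valid_periods = [] ∨ (valid_periods.length : Int) < duration ∨
    (1 ≤ duration ∧ ∀ p ∈ valid_periods, ((PySem.Dict.mk p).get? "index").isSome = true)
instance (duration : Int) (valid_periods : List (List (String × Int))) : Decidable (Pre_find_consecutive_periods duration valid_periods) := by unfold Pre_find_consecutive_periods; infer_instance

def pvWitness_find_consecutive_periods : Int × (List (List (String × Int))) := (2, [[("index", 4)], [("index", 2)], [("index", 3)]])

-- On a non-empty period list with duration <= 0, A raises (IndexError on indices[0] of an empty
-- block, or KeyError inside sorted if a period lacks "index"); B returns [].
def Raises_find_consecutive_periods (duration : Int) (valid_periods : List (List (String × Int))) : Prop :=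
  valid_periods ≠ [] ∧ duration ≤ 0
instance (duration : Int) (valid_periods : List (List (String × Int))) : Decidable (Raises_find_consecutive_periods duration valid_periods) := by unfold Raises_find_consecutive_periods; infer_instance
def pvRaiseWitness_find_consecutive_periods : Int × (List (List (String × Int))) := (0, [[("index", 1)]])
def pvRaiseWitnessOut_find_consecutive_periods : List (List (List (String × Int))) := []

def Spec_find_consecutive_periods (duration : Int) (valid_periods : List (List (String × Int))) (out : List (List (List (String × Int)))) : Prop := out = find_consecutive_periods_alt duration valid_periods
instance (duration : Int) (valid_periods : List (List (String × Int))) (out : List (List (List (String × Int)))) : Decidable (Spec_find_consecutive_periods duration valid_periods out) := by unfold Spec_find_consecutive_periods; infer_instance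

-- ===== CLAIM (what is proved, stated in full; the proofs are below) =====
def Claim_equal_find_consecutive_periods : Prop := ∀ (duration : Int) (valid_periods : List (List (String × Int))), Dom_find_consecutive_periods duration valid_periods → Pre_find_consecutive_periods duration valid_periods → Spec_find_consecutive_periods duration valid_periods (find_consecutive_periods duration valid_periods)

def Claim_raises_find_consecutive_periods : Prop := (∀ (duration : Int) (valid_periods : List (List (String × Int))), Dom_find_consecutive_periods duration valid_periods → Raises_find_consecutive_periods duration valid_periods → ¬ Pre_find_consecutive_periods duration valid_periods) ∧ (Dom_find_consecutive_periods (pvRaiseWitness_find_consecutive_periods.1) (pvRaiseWitness_find_consecutive_periods.2) ∧ Raises_find_consecutive_periods (pvRaiseWitness_find_consecutive_periods.1) (pvRaiseWitness_find_consecutive_periods.2) ∧ find_consecutive_periods_alt (pvRaiseWitness_find_consecutive_periods.1) (pvRaiseWitness_find_consecutive_periods.2) = pvRaiseWitnessOut_find_consecutive_periods)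

-- ===== LEMMAS AND PROOFS =====

-- the "consecutive indices" relation between adjacent periods
abbrev pvStep (a b : List (String × Int)) : Prop := pvIdx b = pvIdx a + 1

-- all length-d windows of xs whose indices are consecutive, in order of start position
def pvW (d : Nat) (xs : List (List (String × Int))) : List (List (List (String × Int))) :=
  ((List.range (xs.length + 1 - d)).map (fun i => (xs.drop i).take d)).filter
    (fun b => decide (List.IsChain pvStep b))

theorem pvW_of_big {d : Nat} {xs : List (List (String × Int))} (h : xs.length < d) :
    pvW d xs = [] := by
  unfold pvW
  have h0 : xs.length + 1 - d = 0 := by omega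
  rw [h0]
  rfl

theorem pvW_cons {d : Nat} {a : List (String × Int)} {t : List (List (String × Int))}
    (h : d ≤ t.length + 1) :
    pvW d (a :: t) =
      (if decide (List.IsChain pvStep ((a :: t).take d)) then [(a :: t).take d] else []) ++ pvW d t := by
  unfold pvW
  have h1 : (a :: t).length + 1 - d = (t.length + 1 - d) + 1 := by
    simp only [List.length_cons]; omega
  rw [h1, List.range_succ_eq_map]
  simp only [List.map_cons, List.map_map, List.filter_cons, Function.comp_def, Nat.succ_eq_add_one,
    List.drop_succ_cons, List.drop_zero]
  split <;> simp

theorem pvW_of_chain {d : Nat} {w : List (List (String × Int))}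
    (hc : List.IsChain pvStep w) (hle : w.length ≤ d) :
    pvW d w = if w.length = d then [w] else [] := by
  by_cases h : w.length = d
  · unfold pvW
    have h1 : w.length + 1 - d = 1 := by omega
    rw [h1]
    simp [List.take_of_length_le (Nat.le_of_eq h), h, hc]
  · rw [pvW_of_big (by omega), if_neg h]

theorem pvGo_acc (d : Nat) (w : List (List (String × Int))) (blocks : List (List (List (String × Int)))) (xs : List (List (String × Int))) :
    pvGo d w blocks xs = blocks ++ pvGo d w [] xs := by
  induction xs generalizing w blocks with
  | nil => simp [pvGo]
  | cons p rest ih =>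
    rw [pvGo, pvGo]
    conv_lhs => rw [ih]
    conv_rhs => rw [ih]
    have hgen : ∀ (C : Prop) [Decidable C] (x : List (List (String × Int)))
        (X bl : List (List (List (String × Int)))),
        (if C then bl ++ [x] else bl) ++ X = bl ++ ((if C then [] ++ [x] else []) ++ X) := by
      intro C _ x X bl; split <;> simp
    exact hgen _ _ _ _

theorem pvW_reset {d : Nat} (p : List (String × Int)) (rest : List (List (String × Int))) :
    ∀ (w : List (List (String × Int))), List.IsChain pvStep w → w.length ≤ d → 1 ≤ d →
    (∀ x, w.getLast? = some x → ¬ pvStep x p) →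
    pvW d (w ++ p :: rest) = (if w.length = d then [w] else []) ++ pvW d (p :: rest) := by
  intro w
  induction w with
  | nil =>
    intro _ _ hd _
    rw [List.nil_append, if_neg (by simp only [List.length_nil]; omega), List.nil_append]
  | cons a w' ih =>
    intro hc hle hd hlast
    by_cases hbig : (a :: w' ++ p :: rest).length < d
    · have hb1 : (p :: rest).length < d := by simp at hbig ⊢; omega
      have hne : ¬ ((a :: w').length = d) := by simp at hbig ⊢; omega
      rw [pvW_of_big hbig, pvW_of_big hb1, if_neg hne]
      simp
    · push Not at hbig
      rw [show (a :: w') ++ p :: rest = a :: (w' ++ p :: rest) from rfl]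
      rw [pvW_cons (by simp at hbig ⊢; omega)]
      have hlast' : ∀ x, w'.getLast? = some x → ¬ pvStep x p := by
        intro x hx
        apply hlast x
        cases w' with
        | nil => simp at hx
        | cons b l => simpa [List.getLast?_cons_cons] using hx
      rw [ih hc.tail (by simp at hle ⊢; omega) hd hlast']
      have hw' : ¬ (w'.length = d) := by simp at hle; omega
      rw [if_neg hw', List.nil_append]
      by_cases heq : (a :: w').length = d
      · have htake : (a :: (w' ++ p :: rest)).take d = a :: w' := by
          rw [show a :: (w' ++ p :: rest) = (a :: w') ++ (p :: rest) from rfl]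
          exact List.take_left' heq
        rw [htake, if_pos heq]
        simp [hc]
      · have hlt : (a :: w').length < d := by
          have := hle; omega
        have hnc : ¬ List.IsChain pvStep ((a :: (w' ++ p :: rest)).take d) := by
          rw [show a :: (w' ++ p :: rest) = (a :: w') ++ (p :: rest) from rfl]
          rw [List.take_append, List.take_of_length_le (Nat.le_of_lt hlt)]
          have hpos : 1 ≤ d - (a :: w').length := by
            simp only [List.length_cons] at hlt ⊢; omega
          intro hch
          obtain ⟨m, hm⟩ : ∃ m, d - (a :: w').length = m + 1 := ⟨d - (a :: w').length - 1, by simp only [List.length_cons] at hpos ⊢; omega⟩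
          rw [hm, List.take_succ_cons] at hch
          rcases List.isChain_append.mp hch with ⟨_, _, hjun⟩
          have hg : (a :: w').getLast? = some ((a :: w').getLast (by simp)) := List.getLast?_eq_some_getLast _
          exact hlast _ hg (hjun _ (by simp [hg]) p (by simp))
        rw [if_neg heq]
        simp [hnc]

theorem pvGo_cons_reset {d : Nat} {w : List (List (String × Int))} {p : List (String × Int)}
    (blocks : List (List (List (String × Int)))) (rest : List (List (String × Int)))
    (hd : 1 ≤ d) (hcond : w ≠ [] ∧ pvIdx p ≠ pvIdx (w.getLastD []) + 1) :
    pvGo d w blocks (p :: rest) = pvGo d [p] (if 1 = d then blocks ++ [[p]] else blocks) rest := by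
  rw [pvGo, if_pos hcond]
  rw [if_neg (show ¬ d < (([] : List (List (String × Int))) ++ [p]).length by
    simp only [List.nil_append, List.length_cons, List.length_nil]; omega)]
  simp

theorem pvGo_cons_grow {d : Nat} {w : List (List (String × Int))} {p : List (String × Int)}
    (blocks : List (List (List (String × Int)))) (rest : List (List (String × Int)))
    (hcond : ¬ (w ≠ [] ∧ pvIdx p ≠ pvIdx (w.getLastD []) + 1)) (hlen : ¬ d < (w ++ [p]).length) :
    pvGo d w blocks (p :: rest) =
      pvGo d (w ++ [p]) (if (w ++ [p]).length = d then blocks ++ [w ++ [p]] else blocks) rest := by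
  rw [pvGo, if_neg hcond, if_neg hlen]

theorem pvGo_cons_slide {d : Nat} {w : List (List (String × Int))} {p : List (String × Int)}
    (blocks : List (List (List (String × Int)))) (rest : List (List (String × Int)))
    (hcond : ¬ (w ≠ [] ∧ pvIdx p ≠ pvIdx (w.getLastD []) + 1)) (hlen : d < (w ++ [p]).length) :
    pvGo d w blocks (p :: rest) =
      pvGo d (w ++ [p]).tail (if (w ++ [p]).tail.length = d then blocks ++ [(w ++ [p]).tail] else blocks) rest := by
  rw [pvGo, if_neg hcond, if_pos hlen]

theorem pvGo_spec {d : Nat} (hd : 1 ≤ d) :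
    ∀ (xs w : List (List (String × Int))), List.IsChain pvStep w → w.length ≤ d →
    pvW d (w ++ xs) = (if w.length = d then [w] else []) ++ pvGo d w [] xs := by
  intro xs
  induction xs with
  | nil =>
    intro w hc hle
    rw [List.append_nil, pvW_of_chain hc hle]
    simp [pvGo]
  | cons p rest ih =>
    intro w hc hle
    by_cases hcond : w ≠ [] ∧ pvIdx p ≠ pvIdx (w.getLastD []) + 1
    · -- the run is broken: the window resets to [p]
      rw [pvGo_cons_reset [] rest hd hcond, pvGo_acc]
      have hlast : ∀ x, w.getLast? = some x → ¬ pvStep x p := by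
        intro x hx hstep
        have hdx : w.getLastD [] = x := by rw [List.getLastD_eq_getLast?, hx]; rfl
        exact hcond.2 (by rw [hdx]; exact hstep)
      rw [pvW_reset p rest w hc hle hd hlast]
      have h1 := ih [p] (by simp) (by simpa using hd)
      simp only [List.cons_append, List.nil_append] at h1
      rw [h1]
      simp
    · by_cases hwnil : w = []
      · subst hwnil
        rw [pvGo_cons_grow [] rest hcond (by simp only [List.nil_append, List.length_cons, List.length_nil]; omega), pvGo_acc]
        have h1 := ih ([] ++ [p]) (by simp) (by simpa using hd)
        simp only [List.cons_append, List.nil_append] at h1 ⊢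
        rw [h1]
        have h0 : ¬ (0 = d) := by omega
        simp [h0]
      · have hstep : pvIdx p = pvIdx (w.getLastD []) + 1 := by
          by_contra h; exact hcond ⟨hwnil, h⟩
        have hchain2 : List.IsChain pvStep (w ++ [p]) := by
          apply List.isChain_append.mpr
          refine ⟨hc, by simp, ?_⟩
          intro x hx y hy
          simp only [List.head?_cons, Option.mem_some_iff] at hy
          subst hy
          have hdx : w.getLastD [] = x := by
            rw [List.getLastD_eq_getLast?]
            simp only [Option.mem_def] at hx
            rw [hx]; rfl
          show pvIdx p = pvIdx x + 1
          rw [← hdx]; exact hstep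
        by_cases hlen : w.length = d
        · -- full window slides: drop the head, emit the new window
          rw [pvGo_cons_slide [] rest hcond (by simp only [List.length_append, List.length_cons, List.length_nil]; omega), pvGo_acc]
          obtain ⟨a, w', rfl⟩ : ∃ a w', w = a :: w' := by
            cases w with
            | nil => exact absurd rfl hwnil
            | cons a w' => exact ⟨a, w', rfl⟩
          have hch3 : List.IsChain pvStep ((a :: w' ++ [p]).tail) := hchain2.tail
          simp only [List.cons_append, List.tail_cons] at hch3 ⊢
          have h1 := ih (w' ++ [p]) hch3 (by simp only [List.length_append, List.length_cons, List.length_nil] at hlen ⊢; omega)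
          simp only [List.append_assoc, List.cons_append, List.nil_append] at h1
          rw [show a :: (w' ++ p :: rest) = a :: (w' ++ p :: rest) from rfl, pvW_cons (by simp only [List.length_append, List.length_cons] at hlen ⊢; omega)]
          have htake : (a :: (w' ++ p :: rest)).take d = a :: w' := by
            rw [show a :: (w' ++ p :: rest) = (a :: w') ++ (p :: rest) from rfl]
            exact List.take_left' hlen
          rw [htake, h1]
          have hlen3 : (w' ++ [p]).length = d := by
            simp only [List.length_append, List.length_cons, List.length_nil] at hlen ⊢; omega
          simp [hc, hlen, hlen3]
        · -- window still growing
          have hlt : w.length < d := by omega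
          rw [pvGo_cons_grow [] rest hcond (by simp only [List.length_append, List.length_cons, List.length_nil]; omega), pvGo_acc]
          have h1 := ih (w ++ [p]) hchain2 (by simp only [List.length_append, List.length_cons, List.length_nil]; omega)
          simp only [List.append_assoc, List.cons_append, List.nil_append] at h1
          rw [if_neg hlen, h1]
          simp

-- the inner all-over-range gap check of A is the IsChain predicate
theorem pv_check_eq_chain (l : List Int) :
    ((PySem.List.pyRange 0 ((l.length : Int) - 1)).all
      (fun j => PySem.List.pyGetD l (j + 1) 0 == PySem.List.pyGetD l j 0 + 1)) =
    decide (List.IsChain (fun a b : Int => b = a + 1) l) := by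
  rw [Bool.eq_iff_iff]
  simp only [List.all_eq_true, decide_eq_true_eq, PySem.List.mem_pyRange_one, beq_iff_eq,
    List.isChain_iff_getElem]
  constructor
  · intro h i hi
    have hj := h (i : Int) ⟨by omega, by omega⟩
    rw [show ((i : Int) + 1) = ((i + 1 : Nat) : Int) by push_cast; ring] at hj
    simp only [PySem.List.pyGetD_natCast] at hj
    rw [List.getD_eq_getElem _ _ (by omega), List.getD_eq_getElem _ _ (by omega)] at hj
    exact hj
  · intro h j hj
    obtain ⟨i, rfl⟩ : ∃ i : Nat, j = (i : Int) := ⟨j.toNat, (Int.toNat_of_nonneg hj.1).symm⟩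
    have hi : i + 1 < l.length := by omega
    have := h i hi
    rw [show ((i : Int) + 1) = ((i + 1 : Nat) : Int) by push_cast; ring]
    simp only [PySem.List.pyGetD_natCast]
    rw [List.getD_eq_getElem _ _ (by omega), List.getD_eq_getElem _ _ (by omega)]
    exact this

-- ===== VERDICT (by name: the statement is the Claim_ definition above) =====
theorem find_consecutive_periods_spec : Claim_equal_find_consecutive_periods := by
  intro duration vps _ hpre
  unfold Spec_find_consecutive_periods
  by_cases hnil : vps = []
  · subst hnil
    by_cases hdl : duration ≤ 0
    · simp [find_consecutive_periods, find_consecutive_periods_alt, hdl]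
    · have hdl' : (0 : Int) < duration := by omega
      simp [find_consecutive_periods, find_consecutive_periods_alt, hdl']
  · by_cases hlen : (vps.length : Int) < duration
    · simp [find_consecutive_periods, find_consecutive_periods_alt, hlen]
    · have hd1 : (1 : Int) ≤ duration := by
        rcases hpre with h | h | h
        · exact absurd h hnil
        · exact absurd h hlen
        · exact h.1
      have hd0 : 1 ≤ duration.toNat := by omega
      have hdur : duration = (duration.toNat : Int) := by omega
      have hnl : vps.length ≠ 0 := by simpa [List.length_eq_zero_iff] using hnil
      have hdn : duration.toNat ≤ vps.length := by omega
      have hB : find_consecutive_periods_alt duration vps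
          = pvW duration.toNat (PySem.List.sorted vps (fun p => pvIdx p)) := by
        simp only [find_consecutive_periods_alt]
        rw [if_neg (by omega)]
        have h := pvGo_spec hd0 (PySem.List.sorted vps (fun p => pvIdx p)) [] (by simp) (by simp)
        rw [List.nil_append] at h
        rw [h, if_neg (by simp only [List.length_nil]; omega), List.nil_append]
      rw [hB]
      simp only [find_consecutive_periods]
      rw [if_neg (by simp [hnil, hlen]), if_neg (by simp [PySem.List.length_sorted, hlen])]
      rw [PySem.List.foldl_append_if, List.nil_append]
      set d := duration.toNat with hdd
      set s := PySem.List.sorted vps (fun p => pvIdx p) with hs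
      have hsl : s.length = vps.length := PySem.List.length_sorted _ _ _
      set m := s.length + 1 - d with hmm
      have hm : (((s.length : Int) - duration + 1) - 0).toNat = m := by omega
      rw [PySem.List.pyRange_one, hm, List.filter_map, List.map_map]
      rw [pvW, List.filter_map]
      simp only [Function.comp_def, zero_add]
      have hpred : ∀ k ∈ List.range m,
          ((PySem.List.pyRange 0
              (((List.map (fun p => pvIdx p) (PySem.List.slice s (some (k : Int)) (some ((k : Int) + duration)))).length : Int) - 1)).all
            (fun j => PySem.List.pyGetD (List.map (fun p => pvIdx p) (PySem.List.slice s (some (k : Int)) (some ((k : Int) + duration)))) (j + 1) 0 ==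
              PySem.List.pyGetD (List.map (fun p => pvIdx p) (PySem.List.slice s (some (k : Int)) (some ((k : Int) + duration)))) j 0 + 1))
          = decide (List.IsChain pvStep (List.take d (List.drop k s))) := by
        intro k _
        rw [hdur, PySem.List.slice_natCast_add, pv_check_eq_chain, decide_eq_decide]
        exact List.isChain_map _
      rw [List.filter_congr hpred]
      have hfun : ∀ k ∈ List.filter (fun k => decide (List.IsChain pvStep (List.take d (List.drop k s)))) (List.range m),
          ((PySem.List.slice s (some (k : Int)) (some ((k : Int) + duration))),
            PySem.List.pyGetD (List.map (fun p => pvIdx p) (PySem.List.slice s (some (k : Int)) (some ((k : Int) + duration)))) 0 0)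
          = ((List.take d (List.drop k s)), PySem.List.pyGetD (List.map (fun p => pvIdx p) (List.take d (List.drop k s))) 0 0) := by
        intro k _
        rw [hdur, PySem.List.slice_natCast_add]
      rw [List.map_congr_left hfun]
      have hstart : ∀ k (hk : k < m),
          PySem.List.pyGetD (List.map (fun p => pvIdx p) (List.take d (List.drop k s))) 0 0
          = pvIdx (s[k]'(by omega)) := by
        intro k hk
        have h1 : 0 < (List.map (fun p => pvIdx p) (List.take d (List.drop k s))).length := by
          simp only [List.length_map, List.length_take, List.length_drop]; omega
        rw [PySem.List.pyGetD_zero, List.getD_eq_getElem _ _ h1, List.getElem_map, List.getElem_take,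
          List.getElem_drop]
        simp
      have hpair : List.Pairwise (fun (a b : List (List (String × Int)) × Int) => a.2 ≤ b.2)
          (List.map (fun k => ((List.take d (List.drop k s)),
              PySem.List.pyGetD (List.map (fun p => pvIdx p) (List.take d (List.drop k s))) 0 0))
            (List.filter (fun k => decide (List.IsChain pvStep (List.take d (List.drop k s)))) (List.range m))) := by
        refine List.Pairwise.map _ ?_ (List.Pairwise.and_mem.mp ((List.pairwise_lt_range).filter _))
        intro a b ⟨ha, hb, hab⟩
        have ha' : a < m := List.mem_range.mp (List.mem_of_mem_filter ha)
        have hb' : b < m := List.mem_range.mp (List.mem_of_mem_filter hb)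
        show PySem.List.pyGetD _ 0 0 ≤ PySem.List.pyGetD _ 0 0
        rw [hstart a ha', hstart b hb']
        exact PySem.List.key_sorted_getElem_mono vps (fun p => pvIdx p) (Nat.le_of_lt hab) (by rw [← hs]; omega)
      rw [PySem.List.sorted_eq_self_of_pairwise _ _ hpair, List.map_map]
      simp only [Function.comp_def]
      rfl

def find_consecutive_periods_raises : Claim_raises_find_consecutive_periods := by
  unfold Claim_raises_find_consecutive_periods
  refine ⟨fun duration vps _ hr hp => ?_, by decide⟩
  rcases hr with ⟨hne, hle⟩
  rcases hp with h | h | h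
  · exact hne h
  · omega
  · omega
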